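-- pv_equiv track=rewrite | github.com/richa-kd/csi3120 | A1_3120/A1.py | get_expressions
-- ===== SOURCE A (Python) =====
-- from typing import Union, List, Optional
--
-- def find_parenthesis_index(tokens: List[str]) -> int:
--     """
--     Finds the index of the closing bracket that matches the opening bracket in the beginning of the list of tokens.
--
--     Precondition: the first element in the list of tokens must be '('
--
--     :param tokens: A list of token strings
--     :return: the index of the matching closing bracket
--     :raises ValueError: if there is no such closing bracket
--     """
--     level = 0
--     for i in range(1, len(tokens)):
--         if tokens[i] == "(":
--             level += 1
--         elif tokens[i] == ")":
--             if level == 0: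
--                 return i
--             else:
--                 level -= 1
--     raise ValueError("no corresponding closing bracket found")
--
-- def get_expressions(tokens: List[str]) -> List[tuple[int, List[str]]]:
--     """
--     Gets a list of 2-tuples of token id and sublist of tokens by partitioning the list of tokens into sublists that
--     correspond to a certain type of expression. The type of expression is denoted by a token id as follows:
--     - token id = 0: the lambda expression
--     - token id = 1: the expression enclosed by 2 brackets
--     - token id = 2: the variable expression
--
--     :param tokens: A list of token strings
--     :return: a list of 2-tuples of a token id and an expression belonging to a certain id
--     """
--     output = []
--     i = 0
--     # rule: <expr> <expr>
--     while i < len(tokens):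
--         # rule: '\' <var> <expr>
--         if tokens[i] == "\\":
--             output.append((0, tokens[i:])) # take every tokens as a whole lambda expression
--             break
--         # rule: '(' <expr> ')'
--         elif tokens[i] == "(":
--             idx = find_parenthesis_index(tokens[i:]) # index of matching ')'
--             output.append((1, tokens[i:i+idx+1])) # take every tokens starting from '(' to ')'
--             i += idx + 1
--         # rule: <var>
--         else:
--             output.append((2, tokens[i:i+1])) # take only one token as a separate expression
--             i += 1
--     return output
-- ===== SOURCE B (Python) =====
-- def get_expressions(tokens):
--     output = []
--     buf = None      # the parenthesised group currently being collected, else None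
--     depth = 0
--     for k, t in enumerate(tokens):
--         if buf is not None:
--             buf.append(t)
--             if t == "(":
--                 depth += 1
--             elif t == ")":
--                 depth -= 1
--                 if depth == 0:
--                     output.append((1, buf))
--                     buf = None
--         elif t == "\\":
--             output.append((0, tokens[k:]))
--             return output
--         elif t == "(":
--             buf = [t]
--             depth = 1
--         else:
--             output.append((2, [t]))
--     if buf is not None:
--         raise ValueError("no corresponding closing bracket found")
--     return output
-- ===== Notes on version B (the rewrite author's own statement) =====
-- stated objective: faster
-- what changed: A re-scans with find_parenthesis_index on a fresh slice tokens[i:] for every '(' and slices out each group; B makes one single left-to-right pass that collects the current parenthesised group incrementally with a depth counter, never slicing or rescanning.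
-- outside the precondition, e.g. on get_expressions(['(', 'x']): A raises ValueError, B raises ValueError
import Mathlib
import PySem

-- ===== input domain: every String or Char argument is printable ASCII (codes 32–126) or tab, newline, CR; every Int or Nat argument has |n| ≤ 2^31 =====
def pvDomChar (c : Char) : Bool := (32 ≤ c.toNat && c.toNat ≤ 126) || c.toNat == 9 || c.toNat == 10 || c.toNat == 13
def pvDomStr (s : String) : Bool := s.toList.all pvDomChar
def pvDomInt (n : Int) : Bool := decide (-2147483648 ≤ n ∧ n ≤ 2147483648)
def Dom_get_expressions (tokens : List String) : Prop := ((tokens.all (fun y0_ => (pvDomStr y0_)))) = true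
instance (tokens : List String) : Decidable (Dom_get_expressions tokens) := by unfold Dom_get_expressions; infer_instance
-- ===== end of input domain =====

-- B replaces A's slice-and-rescan partitioning by one single pass that collects each
-- parenthesised group incrementally with a depth counter (objective: faster, no repeated slicing).
-- Both A and B raise ValueError on an unmatched '(' (outside Pre_ below).

-- ===== PORT A =====
-- find_parenthesis_index: returns none where Python raises ValueError
def fpiAux (tokens : List String) (i : Nat) (level : Int) : Option Nat :=
  if h : i < tokens.length then
    if tokens[i] = "(" then fpiAux tokens (i+1) (level+1)
    else if tokens[i] = ")" then
      if level = 0 then some i else fpiAux tokens (i+1) (level-1)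
    else fpiAux tokens (i+1) level
  else none
termination_by tokens.length - i

def geAux (tokens : List String) (i : Nat) : List (Int × List String) :=
  if h : i < tokens.length then
    if tokens[i] = "\\" then [((0:Int), tokens.drop i)]
    else if tokens[i] = "(" then
      match fpiAux (tokens.drop i) 1 0 with
      | some idx => ((1:Int), (tokens.drop i).take (idx+1)) :: geAux tokens (i+idx+1)
      | none => []   -- Python raises ValueError here; excluded by Pre_
    else ((2:Int), [tokens[i]]) :: geAux tokens (i+1)
  else []
termination_by tokens.length - i
decreasing_by all_goals omega

def get_expressions (tokens : List String) : List (Int × List String) := geAux tokens 0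

-- ===== PORT B =====
-- single pass; acc accumulates output in reverse (Python's append), buf is the open group
def altAux (ts : List String) (acc : List (Int × List String))
    (buf : Option (List String)) (depth : Int) : List (Int × List String) :=
  match ts with
  | [] => acc.reverse   -- Python raises ValueError if buf ≠ none (excluded by Pre_)
  | t :: rest =>
    match buf with
    | some b =>
      let b' := b ++ [t]
      if t = "(" then altAux rest acc (some b') (depth+1)
      else if t = ")" then
        if depth - 1 = 0 then altAux rest (((1:Int), b') :: acc) none 0
        else altAux rest acc (some b') (depth-1)
      else altAux rest acc (some b') depth
    | none =>
      if t = "\\" then (((0:Int), t :: rest) :: acc).reverse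
      else if t = "(" then altAux rest acc (some [t]) 1
      else altAux rest (((2:Int), [t]) :: acc) none 0

def get_expressions_alt (tokens : List String) : List (Int × List String) :=
  altAux tokens [] none 0

-- ===== PRECONDITION & SPEC =====
-- Pre_ excludes exactly the inputs with an unmatched '(' (no top-level lambda before it),
-- on which Python A (and B) raise ValueError.
def balOk : List String → Nat → Bool
  | [], d => d == 0
  | t :: ts, 0 => if t = "\\" then true else if t = "(" then balOk ts 1 else balOk ts 0
  | t :: ts, (d+1) => if t = "(" then balOk ts (d+2) else if t = ")" then balOk ts d else balOk ts (d+1)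

def Pre_get_expressions (tokens : List String) : Prop := balOk tokens 0 = true
instance (tokens : List String) : Decidable (Pre_get_expressions tokens) := by
  unfold Pre_get_expressions; infer_instance

def pvWitness_get_expressions : List String := ["(", "x", "(", "y", ")", ")", "z", "\\", "v", "w"]

def Spec_get_expressions (tokens : List String) (out : List (Int × List String)) : Prop := out = get_expressions_alt tokens
instance (tokens : List String) (out : List (Int × List String)) : Decidable (Spec_get_expressions tokens out) := by unfold Spec_get_expressions; infer_instance

-- ===== CLAIM (what is proved, stated in full; the proofs are below) =====
def Claim_equal_get_expressions : Prop := ∀ (tokens : List String), Dom_get_expressions tokens → Pre_get_expressions tokens → Spec_get_expressions tokens (get_expressions tokens)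

-- ===== LEMMAS AND PROOFS =====

-- suffix reformulation of A's index loop (proof helper only)
def fpi' : List String → Nat → Option Nat
  | [], _ => none
  | t :: rest, l =>
    if t = "(" then (fpi' rest (l+1)).map (·+1)
    else if t = ")" then (if l = 0 then some 0 else (fpi' rest (l-1)).map (·+1))
    else (fpi' rest l).map (·+1)

def geS : List String → List (Int × List String)
  | [] => []
  | t :: rest =>
    if t = "\\" then [((0:Int), t :: rest)]
    else if t = "(" then
      match fpi' rest 0 with
      | some j => ((1:Int), (t :: rest).take (j+2)) :: geS (rest.drop (j+1))
      | none => []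
    else ((2:Int), [t]) :: geS rest
termination_by ts => ts.length
decreasing_by all_goals (simp_all; try omega)

theorem fpi_shift_aux (t : String) (ts : List String) :
    ∀ n i (l : Int), ts.length ≤ i + n → fpiAux (t :: ts) (i+1) l = (fpiAux ts i l).map (·+1) := by
  intro n
  induction n with
  | zero =>
    intro i l h
    conv_lhs => rw [fpiAux]
    conv_rhs => rw [fpiAux]
    rw [dif_neg (by simp; omega), dif_neg (by omega)]
    rfl
  | succ n ih =>
    intro i l h
    conv_lhs => rw [fpiAux]
    conv_rhs => rw [fpiAux]
    by_cases hi : i < ts.length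
    · rw [dif_pos (by simp; omega), dif_pos hi]
      simp only [List.getElem_cons_succ]
      split_ifs with h1 h2 h3
      · exact ih (i+1) (l+1) (by omega)
      · simp
      · exact ih (i+1) (l-1) (by omega)
      · exact ih (i+1) l (by omega)
    · rw [dif_neg (by simp; omega), dif_neg (by omega)]
      rfl

theorem fpi_shift (ts : List String) (t : String) (i : Nat) (l : Int) :
    fpiAux (t :: ts) (i+1) l = (fpiAux ts i l).map (·+1) :=
  fpi_shift_aux t ts ts.length i l (by omega)



theorem fpi_zero (ts : List String) (l : Nat) :
    fpiAux ts 0 (l : Int) = fpi' ts l := by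
  induction ts generalizing l with
  | nil => rw [fpiAux]; simp [fpi']
  | cons t rest ih =>
    rw [fpiAux]
    rw [dif_pos (by simp : (0:Nat) < (t :: rest).length)]
    simp only [List.getElem_cons_zero, fpi_shift, fpi']
    have e1 : ((l:Int)+1) = (((l+1 : Nat)) : Int) := by push_cast; ring
    rw [e1, ih (l+1)]
    by_cases hl : l = 0
    · subst hl
      have h0 := ih 0
      simp only [Nat.cast_zero] at h0
      simp [h0]
    · have e2 : ((l:Int)-1) = (((l-1:Nat)):Int) := by omega
      rw [e2, ih (l-1), ih l]
      simp only [Nat.cast_eq_zero]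


theorem fpi_head (t : String) (rest : List String) :
    fpiAux (t :: rest) 1 0 = (fpi' rest 0).map (·+1) := by
  have h := fpi_shift rest t 0 0
  have h0 : fpiAux rest 0 (0:Int) = fpi' rest 0 := by
    simpa using fpi_zero rest 0
  simpa [h0] using h

theorem geAux_eq_geS_aux (tokens : List String) :
    ∀ n i, tokens.length ≤ i + n → geAux tokens i = geS (tokens.drop i) := by
  intro n
  induction n with
  | zero =>
    intro i h
    rw [geAux, dif_neg (by omega), List.drop_of_length_le (by omega), geS]
  | succ n ih =>
    intro i h
    by_cases hi : i < tokens.length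
    · have hd : tokens.drop i = tokens[i] :: tokens.drop (i+1) :=
        List.drop_eq_getElem_cons hi
      rw [geAux, dif_pos hi, hd, geS]
      by_cases h1 : tokens[i] = "\\"
      · simp [h1]
      · rw [if_neg h1, if_neg h1]
        by_cases h2 : tokens[i] = "("
        · rw [if_pos h2, if_pos h2, fpi_head]
          cases hj : fpi' (tokens.drop (i+1)) 0 with
          | none => simp
          | some j =>
            simp only [Option.map_some]
            have hdrop : tokens.drop (i + (j+1) + 1) = (tokens.drop (i+1)).drop (j+1) := by
              rw [List.drop_drop]; ring_nf
            rw [ih (i + (j+1) + 1) (by omega), hdrop]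
        · rw [if_neg h2, if_neg h2, ih (i+1) (by omega)]
    · rw [geAux, dif_neg (by omega), List.drop_of_length_le (by omega), geS]

theorem geAux_eq_geS (tokens : List String) (i : Nat) :
    geAux tokens i = geS (tokens.drop i) := by
  exact geAux_eq_geS_aux tokens tokens.length i (by omega)

theorem altAux_acc (ts : List String) (acc : List (Int × List String))
    (buf : Option (List String)) (d : Int) :
    altAux ts acc buf d = acc.reverse ++ altAux ts [] buf d := by
  induction ts generalizing acc buf d with
  | nil => simp [altAux]
  | cons t rest ih =>
    cases buf with
    | some b =>
      simp only [altAux]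
      split_ifs
      all_goals try ((conv_rhs => rw [ih]); rw [ih])
      all_goals simp
    | none =>
      simp only [altAux]
      split_ifs
      all_goals try ((conv_rhs => rw [ih]); rw [ih])
      all_goals simp

theorem G_some (rest : List String) (l : Nat) (b : List String)
    (acc : List (Int × List String)) (j : Nat) (h : fpi' rest l = some j) :
    altAux rest acc (some b) ((l : Int)+1)
      = altAux (rest.drop (j+1)) (((1:Int), b ++ rest.take (j+1)) :: acc) none 0 := by
  induction rest generalizing l b acc j with
  | nil => simp [fpi'] at h
  | cons u rs ih =>
    rw [fpi'] at h
    by_cases h1 : u = "("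
    · rw [if_pos h1] at h
      cases hj' : fpi' rs (l+1) with
      | none => rw [hj'] at h; simp at h
      | some j' =>
        rw [hj'] at h; simp at h
        subst h
        rw [altAux]
        simp only [if_pos h1]
        have e1 : ((l:Int)+1+1) = (((l+1:Nat)):Int)+1 := by push_cast; ring
        rw [e1, ih (l+1) (b ++ [u]) acc j' hj']
        simp [List.append_assoc]
    · rw [if_neg h1] at h
      by_cases h2 : u = ")"
      · rw [if_pos h2] at h
        by_cases hl : l = 0
        · rw [if_pos hl] at h
          simp at h
          subst h
          subst hl
          rw [altAux]
          simp [h2]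
        · rw [if_neg hl] at h
          cases hj' : fpi' rs (l-1) with
          | none => rw [hj'] at h; simp at h
          | some j' =>
            rw [hj'] at h; simp at h
            subst h
            rw [altAux]
            simp only [if_neg h1, if_pos h2]
            have hne : ¬ ((l:Int)+1-1 = 0) := by
              have : (l:Int) ≠ 0 := by exact_mod_cast hl
              omega
            rw [if_neg hne]
            have e2 : ((l:Int)+1-1) = (((l-1:Nat)):Int)+1 := by omega
            rw [e2, ih (l-1) (b ++ [u]) acc j' hj']
            simp [List.append_assoc]
      · rw [if_neg h2] at h
        cases hj' : fpi' rs l with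
        | none => rw [hj'] at h; simp at h
        | some j' =>
          rw [hj'] at h; simp at h
          subst h
          rw [altAux]
          simp only [if_neg h1, if_neg h2]
          rw [ih l (b ++ [u]) acc j' hj']
          simp [List.append_assoc]

theorem balOk_fpi (rest : List String) (l : Nat) (h : balOk rest (l+1) = true) :
    ∃ j, fpi' rest l = some j ∧ balOk (rest.drop (j+1)) 0 = true := by
  induction rest generalizing l with
  | nil => simp [balOk] at h
  | cons u rs ih =>
    rw [balOk] at h
    by_cases h1 : u = "("
    · rw [if_pos h1] at h
      obtain ⟨j', hj', hb⟩ := ih (l+1) h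
      exact ⟨j'+1, by rw [fpi', if_pos h1, hj']; rfl, by simpa using hb⟩
    · rw [if_neg h1] at h
      by_cases h2 : u = ")"
      · rw [if_pos h2] at h
        cases l with
        | zero => exact ⟨0, by rw [fpi', if_neg h1, if_pos h2]; rfl, by simpa using h⟩
        | succ m =>
          obtain ⟨j', hj', hb⟩ := ih m h
          refine ⟨j'+1, ?_, by simpa using hb⟩
          rw [fpi', if_neg h1, if_pos h2, if_neg (by omega)]
          norm_num [hj']
      · rw [if_neg h2] at h
        obtain ⟨j', hj', hb⟩ := ih l h
        exact ⟨j'+1, by rw [fpi', if_neg h1, if_neg h2, hj']; rfl, by simpa using hb⟩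

theorem main_eq_aux (n : Nat) :
    ∀ ts : List String, ts.length ≤ n → balOk ts 0 = true →
      geS ts = altAux ts [] none 0 := by
  induction n with
  | zero =>
    intro ts hn _
    have : ts = [] := List.eq_nil_of_length_eq_zero (by omega)
    subst this
    simp [geS, altAux]
  | succ n ih =>
    intro ts hn hb
    match ts with
    | [] => simp [geS, altAux]
    | t :: rest =>
      rw [geS, altAux]
      rw [balOk] at hb
      by_cases h1 : t = "\\"
      · simp [h1]
      · rw [if_neg h1] at hb
        rw [if_neg h1, if_neg h1]
        by_cases h2 : t = "("
        · rw [if_pos h2] at hb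
          rw [if_pos h2, if_pos h2]
          obtain ⟨j, hj, hb'⟩ := balOk_fpi rest 0 hb
          rw [hj]
          have hg := G_some rest 0 [t] [] j hj
          norm_num at hg
          rw [hg, altAux_acc]
          have hlen : (rest.drop (j+1)).length ≤ n := by
            simp only [List.length_drop]
            simp at hn
            omega
          rw [← ih (rest.drop (j+1)) hlen hb']
          simp [List.take_succ_cons]
        · rw [if_neg h2] at hb
          rw [if_neg h2, if_neg h2]
          rw [altAux_acc, ← ih rest (by simp at hn; omega) hb]
          simp

theorem main_eq (ts : List String) (h : balOk ts 0 = true) :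
    geS ts = altAux ts [] none 0 := by
  exact main_eq_aux ts.length ts (by omega) h

-- ===== VERDICT (by name: the statement is the Claim_ definition above) =====
theorem get_expressions_spec : Claim_equal_get_expressions := by
  intro tokens _ hpre
  unfold Spec_get_expressions get_expressions get_expressions_alt
  rw [geAux_eq_geS tokens 0]
  simpa using main_eq tokens hpre
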